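-- pv_equiv track=rewrite | github.com/samyar89/PyPhysicist | PyPhysicist/units/conversion.py | _split_unit_expression
-- ===== SOURCE A (Python) =====
-- from typing import Dict, Iterable, Tuple
--
-- def _split_unit_expression(unit: str) -> Tuple[Iterable[str], Iterable[str]]:
--     parts = unit.split("/")
--     numerator = parts[0]
--     denominator = parts[1:] if len(parts) > 1 else []
--     numerator_tokens = [token for token in numerator.split("*") if token]
--     denominator_tokens = []
--     for part in denominator:
--         denominator_tokens.extend(token for token in part.split("*") if token)
--     return numerator_tokens, denominator_tokens
-- ===== SOURCE B (Python) =====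
-- def _split_unit_expression(unit):
--     # single left-to-right character scan (state machine) instead of nested splits
--     num, den = [], []
--     cur = []
--     seen_slash = False
--     for ch in unit:
--         if ch == '*' or ch == '/':
--             if cur:
--                 (den if seen_slash else num).append(''.join(cur))
--                 cur = []
--             if ch == '/':
--                 seen_slash = True
--         else:
--             cur.append(ch)
--     if cur:
--         (den if seen_slash else num).append(''.join(cur))
--     return num, den
-- ===== Notes on version B (the rewrite author's own statement) =====
-- stated objective: alternative
-- what changed: Replaces the split-on-slash pass followed by a loop of per-part split-on-star passes with a single left-to-right character scan that maintains a current token and a seen-slash flag, appending each finished token to the numerator or denominator list as separators are encountered.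
import Mathlib
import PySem

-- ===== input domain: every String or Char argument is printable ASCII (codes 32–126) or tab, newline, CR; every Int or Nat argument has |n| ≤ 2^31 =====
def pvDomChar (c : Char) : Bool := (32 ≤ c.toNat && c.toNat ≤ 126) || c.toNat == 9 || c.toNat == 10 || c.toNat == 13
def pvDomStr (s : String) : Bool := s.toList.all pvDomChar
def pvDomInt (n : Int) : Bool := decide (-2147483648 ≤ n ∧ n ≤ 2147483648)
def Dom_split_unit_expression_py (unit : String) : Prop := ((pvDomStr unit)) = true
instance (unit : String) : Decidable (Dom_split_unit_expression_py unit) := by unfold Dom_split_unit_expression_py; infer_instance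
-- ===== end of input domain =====

-- B replaces A's split-on-slash pass followed by per-part split-on-star passes with one
-- character-level state-machine scan; same return value, no speed claim.

-- ===== PORT A =====
def split_unit_expression_py (unit : String) : List String × List String :=
  let parts := PySem.Chars.splitOn unit.toList ['/']          -- unit.split("/")
  let numerator := parts.headD []                              -- parts[0]; split never returns []
  let denominator := if parts.length > 1 then parts.drop 1 else []
  let numerator_tokens := (PySem.Chars.splitOn numerator ['*']).filter (· ≠ [])
  let denominator_tokens := denominator.foldl
    (fun acc part => acc ++ (PySem.Chars.splitOn part ['*']).filter (· ≠ [])) []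
  (numerator_tokens.map String.ofList, denominator_tokens.map String.ofList)

-- ===== PORT B =====
-- loop body of Source B: flush the current token on a separator, else extend it
def pvStepB (st : List (List Char) × List (List Char) × List Char × Bool) (ch : Char) :
    List (List Char) × List (List Char) × List Char × Bool :=
  match st with
  | (num, den, cur, seen) =>
    if ch = '*' ∨ ch = '/' then
      let nd := if cur ≠ [] then (if seen then (num, den ++ [cur]) else (num ++ [cur], den))
                else (num, den)
      (nd.1, nd.2, [], if ch = '/' then true else seen)
    else
      (num, den, cur ++ [ch], seen)

-- the final `if cur:` flush of Source B
def pvFlushB (st : List (List Char) × List (List Char) × List Char × Bool) :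
    List (List Char) × List (List Char) :=
  match st with
  | (num, den, cur, seen) =>
    if cur ≠ [] then (if seen then (num, den ++ [cur]) else (num ++ [cur], den)) else (num, den)

def split_unit_expression_py_alt (unit : String) : List String × List String :=
  let res := pvFlushB (unit.toList.foldl pvStepB ([], [], [], false))
  (res.1.map String.ofList, res.2.map String.ofList)

-- ===== PRECONDITION & SPEC =====
def Spec_split_unit_expression_py (unit : String) (out : List String × List String) : Prop := out = split_unit_expression_py_alt unit
instance (unit : String) (out : List String × List String) : Decidable (Spec_split_unit_expression_py unit out) := by unfold Spec_split_unit_expression_py; infer_instance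

-- ===== CLAIM (what is proved, stated in full; the proofs are below) =====
def Claim_equal_split_unit_expression_py : Prop := ∀ (unit : String), Dom_split_unit_expression_py unit → Spec_split_unit_expression_py unit (split_unit_expression_py unit)

-- ===== LEMMAS AND PROOFS =====

-- proof-side model of splitting on one separator character
def pvSplitChar (c : Char) : List Char → List (List Char)
  | [] => [[]]
  | d :: rest => if d = c then [] :: pvSplitChar c rest
                 else match pvSplitChar c rest with
                      | [] => [[d]]
                      | h :: t => (d :: h) :: t

-- apply f to the head part only
def pvMH (f : List Char → List Char) : List (List Char) → List (List Char)
  | [] => []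
  | h :: t => f h :: t

def pvTok (l : List Char) : List (List Char) := (pvSplitChar '*' l).filter (· ≠ [])

theorem pvSplitChar_ne_nil (c : Char) (l : List Char) : pvSplitChar c l ≠ [] := by
  cases l with
  | nil => simp [pvSplitChar]
  | cons d rest =>
    simp only [pvSplitChar]
    split
    · simp
    · split <;> simp

theorem pvSplitChar_cons (c d : Char) (rest : List Char) :
    pvSplitChar c (d :: rest) =
      if d = c then [] :: pvSplitChar c rest else pvMH (d :: ·) (pvSplitChar c rest) := by
  simp only [pvSplitChar]
  split
  · rfl
  · rcases h : pvSplitChar c rest with _ | ⟨hd, tl⟩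
    · exact absurd h (pvSplitChar_ne_nil c rest)
    · simp [pvMH]

theorem pvMH_id (l : List (List Char)) : pvMH (fun x => x) l = l := by
  cases l <;> simp [pvMH]

theorem pvMH_nil (l : List (List Char)) : pvMH (fun x => [] ++ x) l = l := by
  cases l <;> simp [pvMH]

theorem pvMH_cons (f : List Char → List Char) (h : List Char) (t : List (List Char)) :
    pvMH f (h :: t) = f h :: t := rfl

theorem pvMH_comp (cur : List Char) (d : Char) (l : List (List Char)) :
    pvMH (fun x => cur ++ x) (pvMH (d :: ·) l) = pvMH (fun x => (cur ++ [d]) ++ x) l := by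
  cases l <;> simp [pvMH]

theorem pvSplitOn_single_go (c : Char) (fuel : Nat) (l cur : List Char)
    (acc : List (List Char)) (h : l.length ≤ fuel) :
    PySem.Chars.splitOn.go [c] fuel l cur acc =
      acc.reverse ++ pvMH (fun x => cur.reverse ++ x) (pvSplitChar c l) := by
  induction fuel generalizing l cur acc with
  | zero =>
    have : l = [] := List.eq_nil_of_length_eq_zero (Nat.le_zero.mp h)
    subst this
    simp [PySem.Chars.splitOn.go, pvSplitChar, pvMH]
  | succ f ih =>
    cases l with
    | nil => simp [PySem.Chars.splitOn.go, pvSplitChar, pvMH]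
    | cons d rest =>
      rw [PySem.Chars.splitOn.go]
      simp only [List.isPrefixOf, List.length_cons] at h ⊢
      by_cases hdc : d = c
      · subst hdc
        rw [if_pos (by simp)]
        simp only [List.length_nil, Nat.zero_add, List.drop_one, List.tail_cons]
        rw [ih rest [] ((cur.reverse) :: acc) (by omega)]
        simp only [pvSplitChar_cons, pvMH, List.reverse_cons, List.reverse_nil,
          List.nil_append, List.append_assoc, List.cons_append]
        rcases pvSplitChar d rest with _ | ⟨hd, tl⟩ <;> simp
      · have hne : (d == c) = false := by simp [hdc]
        simp only [beq_eq_false_iff_ne] at hne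
        rw [pvSplitChar_cons]
        simp only [if_neg hdc]
        rw [if_neg (by simp; exact fun hh => hne hh.symm)]
        rw [ih rest (d :: cur) acc (by omega)]
        rcases hsp : pvSplitChar c rest with _ | ⟨hd, tl⟩
        · exact absurd hsp (pvSplitChar_ne_nil c rest)
        · simp [pvMH, List.reverse_cons]

theorem pvSplitOn_single (c : Char) (l : List Char) :
    PySem.Chars.splitOn l [c] = pvSplitChar c l := by
  have := pvSplitOn_single_go c (l.length + 1) l [] [] (by omega)
  simpa [PySem.Chars.splitOn, pvMH_id] using this

theorem pvSplitChar_sep (c : Char) (r : List Char) :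
    pvSplitChar c (c :: r) = [] :: pvSplitChar c r := by
  rw [pvSplitChar_cons, if_pos rfl]

theorem pvSplitChar_other (c d : Char) (r : List Char) (hd : d ≠ c) :
    pvSplitChar c (d :: r) = pvMH (d :: ·) (pvSplitChar c r) := by
  rw [pvSplitChar_cons, if_neg hd]

-- the two components of A's answer, as functions of the remaining input
def pvNum (cur : List Char) (s : List Char) : List (List Char) :=
  (pvMH (fun x => cur ++ x) (pvSplitChar '*' ((pvSplitChar '/' s).headD []))).filter (· ≠ [])

def pvDen (s : List Char) : List (List Char) :=
  ((pvSplitChar '/' s).tail).flatMap pvTok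

theorem pvNum_nil (cur : List Char) : pvNum cur [] = if cur = [] then [] else [cur] := by
  simp only [pvNum, pvSplitChar, List.headD_cons, pvMH]
  by_cases hc : cur = [] <;> simp [hc]

theorem pvDen_nil : pvDen [] = [] := by
  simp [pvDen, pvSplitChar]

theorem pvNum_slash (cur : List Char) (s : List Char) :
    pvNum cur ('/' :: s) = if cur = [] then [] else [cur] := by
  simp only [pvNum, pvSplitChar_sep, List.headD_cons]
  by_cases hc : cur = [] <;> simp [hc, pvSplitChar, pvMH_cons]

theorem pvDen_slash (s : List Char) : pvDen ('/' :: s) = pvNum [] s ++ pvDen s := by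
  simp only [pvDen, pvSplitChar_sep, List.tail_cons, pvNum]
  rcases h : pvSplitChar '/' s with _ | ⟨hd, tl⟩
  · exact absurd h (pvSplitChar_ne_nil _ _)
  · simp [pvTok, pvMH_id, List.flatMap_cons]

theorem pvNum_star (cur : List Char) (s : List Char) :
    pvNum cur ('*' :: s) = (if cur = [] then [] else [cur]) ++ pvNum [] s := by
  simp only [pvNum, pvSplitChar_other '/' '*' s (by decide)]
  rcases h : pvSplitChar '/' s with _ | ⟨hd, tl⟩
  · exact absurd h (pvSplitChar_ne_nil _ _)
  · simp only [pvMH_cons, List.headD_cons, pvSplitChar_sep, pvMH_nil]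
    by_cases hc : cur = [] <;> simp [hc, pvMH_id]

theorem pvDen_star (s : List Char) : pvDen ('*' :: s) = pvDen s := by
  simp only [pvDen, pvSplitChar_other '/' '*' s (by decide)]
  rcases h : pvSplitChar '/' s with _ | ⟨hd, tl⟩
  · exact absurd h (pvSplitChar_ne_nil _ _)
  · simp [pvMH_cons]

theorem pvNum_char (cur : List Char) (d : Char) (s : List Char)
    (h1 : d ≠ '*') (h2 : d ≠ '/') :
    pvNum cur (d :: s) = pvNum (cur ++ [d]) s := by
  simp only [pvNum, pvSplitChar_other '/' d s h2]
  rcases h : pvSplitChar '/' s with _ | ⟨hd, tl⟩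
  · exact absurd h (pvSplitChar_ne_nil _ _)
  · simp only [pvMH_cons, List.headD_cons]
    rw [pvSplitChar_other '*' d hd h1, pvMH_comp]

theorem pvDen_char (d : Char) (s : List Char) (h2 : d ≠ '/') :
    pvDen (d :: s) = pvDen s := by
  simp only [pvDen, pvSplitChar_other '/' d s h2]
  rcases h : pvSplitChar '/' s with _ | ⟨hd, tl⟩
  · exact absurd h (pvSplitChar_ne_nil _ _)
  · simp [pvMH_cons]

theorem pvStepB_sep_true (num den : List (List Char)) (cur : List Char) (ch : Char)
    (hch : ch = '*' ∨ ch = '/') :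
    pvStepB (num, den, cur, true) ch =
      (num, (if cur = [] then den else den ++ [cur]), [], true) := by
  simp only [pvStepB, if_pos hch]
  by_cases hc : cur = [] <;> by_cases hs : ch = '/' <;> simp [hc, hs]

theorem pvStepB_sep_false (num den : List (List Char)) (cur : List Char) (ch : Char)
    (hch : ch = '*' ∨ ch = '/') :
    pvStepB (num, den, cur, false) ch =
      ((if cur = [] then num else num ++ [cur]), den, [],
       if ch = '/' then true else false) := by
  simp only [pvStepB, if_pos hch]
  by_cases hc : cur = [] <;> simp [hc]

theorem pvStepB_char (num den : List (List Char)) (cur : List Char) (seen : Bool)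
    (ch : Char) (h1 : ch ≠ '*') (h2 : ch ≠ '/') :
    pvStepB (num, den, cur, seen) ch = (num, den, cur ++ [ch], seen) := by
  simp [pvStepB, h1, h2]

theorem lemT (r : List Char) (num den : List (List Char)) (cur : List Char) :
    pvFlushB (r.foldl pvStepB (num, den, cur, true)) =
      (num, den ++ pvNum cur r ++ pvDen r) := by
  induction r generalizing den cur with
  | nil =>
    simp only [List.foldl_nil, pvFlushB, pvNum_nil, pvDen_nil]
    by_cases hc : cur = [] <;> simp [hc]
  | cons ch r' ih =>
    by_cases h1 : ch = '*'
    · subst h1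
      rw [List.foldl_cons, pvStepB_sep_true _ _ _ _ (Or.inl rfl), ih, pvNum_star, pvDen_star]
      by_cases hc : cur = [] <;> simp [hc, List.append_assoc]
    · by_cases h2 : ch = '/'
      · subst h2
        rw [List.foldl_cons, pvStepB_sep_true _ _ _ _ (Or.inr rfl), ih, pvNum_slash, pvDen_slash]
        by_cases hc : cur = [] <;> simp [hc, List.append_assoc]
      · rw [List.foldl_cons, pvStepB_char _ _ _ _ _ h1 h2, ih,
          pvNum_char _ _ _ h1 h2, pvDen_char _ _ h2]

theorem lemG (s : List Char) (num den : List (List Char)) (cur : List Char) :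
    pvFlushB (s.foldl pvStepB (num, den, cur, false)) =
      (num ++ pvNum cur s, den ++ pvDen s) := by
  induction s generalizing num cur with
  | nil =>
    simp only [List.foldl_nil, pvFlushB, pvNum_nil, pvDen_nil]
    by_cases hc : cur = [] <;> simp [hc]
  | cons ch s' ih =>
    by_cases h1 : ch = '*'
    · subst h1
      rw [List.foldl_cons, pvStepB_sep_false _ _ _ _ (Or.inl rfl)]
      rw [if_neg (by decide : ¬('*':Char) = '/'), ih, pvNum_star, pvDen_star]
      by_cases hc : cur = [] <;> simp [hc, List.append_assoc]
    · by_cases h2 : ch = '/'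
      · subst h2
        rw [List.foldl_cons, pvStepB_sep_false _ _ _ _ (Or.inr rfl)]
        rw [if_pos rfl, lemT, pvNum_slash, pvDen_slash]
        by_cases hc : cur = [] <;> simp [hc, List.append_assoc]
      · rw [List.foldl_cons, pvStepB_char _ _ _ _ _ h1 h2, ih,
          pvNum_char _ _ _ h1 h2, pvDen_char _ _ h2]

-- ===== VERDICT (by name: the statement is the Claim_ definition above) =====
theorem split_unit_expression_py_spec : Claim_equal_split_unit_expression_py := by
  intro unit _
  unfold Spec_split_unit_expression_py split_unit_expression_py split_unit_expression_py_alt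
  rw [lemG unit.toList [] [] []]
  simp only [pvSplitOn_single, List.nil_append, PySem.List.foldl_append_eq_flatMap, pvNum, pvDen,
    pvMH_id]
  have hdrop : (if (pvSplitChar '/' unit.toList).length > 1
      then (pvSplitChar '/' unit.toList).drop 1 else []) = (pvSplitChar '/' unit.toList).tail := by
    split
    · exact List.drop_one
    · rcases h : pvSplitChar '/' unit.toList with _ | ⟨hd, tl⟩
      · rfl
      · rename_i hlen
        rw [h] at hlen
        simp at hlen
        simp [hlen]
  rw [hdrop]
  constructor
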